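-- pv_equiv track=rewrite | github.com/PedroHPAlmeida/beecrowd-exercises | 3-Strings/ex1243.py | Efrase
-- ===== SOURCE A (Python) =====
-- def Efrase(frase):
--     nums = ('0', '1', '2', '3', '4', '5', '6', '7', '8', '9')
--
--     if frase.count('.') == 1 and frase[len(frase) - 1] != '.' or frase == '.':
--         return False
--     elif frase.count('.') > 1:
--         return False
--     for j in range(0, 10):
--         if nums[j] in frase:
--             return False
--
--     return True
-- ===== SOURCE B (Python) =====
-- def Efrase(frase):
--     dots = 0
--     for c in frase:
--         if '0' <= c <= '9':
--             return False
--         if c == '.':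
--             dots += 1
--     if dots > 1:
--         return False
--     if dots == 1 and (frase == '.' or frase[-1] != '.'):
--         return False
--     return True
-- ===== Notes on version B (the rewrite author's own statement) =====
-- stated objective: simpler
-- what changed: Replaced A's repeated full-string scans (two dot-count calls plus ten per-digit substring membership scans) with a single character pass that maintains a dot counter and bails out on the first digit, deciding the dot-placement rule once after the loop.
import Mathlib
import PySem

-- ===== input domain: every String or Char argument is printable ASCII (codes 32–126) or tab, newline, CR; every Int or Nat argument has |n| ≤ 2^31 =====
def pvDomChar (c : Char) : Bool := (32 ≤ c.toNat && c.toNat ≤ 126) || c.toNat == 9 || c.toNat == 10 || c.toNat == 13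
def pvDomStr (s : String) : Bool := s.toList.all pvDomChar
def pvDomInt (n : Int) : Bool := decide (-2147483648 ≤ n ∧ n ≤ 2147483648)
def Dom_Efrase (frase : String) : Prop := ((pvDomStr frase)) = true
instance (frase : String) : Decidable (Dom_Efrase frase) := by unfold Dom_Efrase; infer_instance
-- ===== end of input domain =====

-- B replaces A's repeated full-string scans (two .count('.') calls and ten per-digit
-- membership scans) with one character pass keeping a dot counter (objective: simpler).

-- ===== PORT A =====
def EfraseNums : List String := ["0","1","2","3","4","5","6","7","8","9"]

def Efrase (frase : String) : Bool :=
  if (PySem.Str.count frase "." = 1 ∧ PySem.Str.pyGet? frase (PySem.Str.len frase - 1) ≠ some '.')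
      ∨ frase = "." then false
  else if 1 < PySem.Str.count frase "." then false
  else if (PySem.List.pyRange 0 10 1).any
      (fun j => PySem.Str.isIn (PySem.List.pyGetD EfraseNums j "") frase) then false
  else true

-- ===== PORT B =====
-- the check after B's loop: dots > 1, or dots == 1 with bad final position
def EfraseAltFinal (frase : String) (dots : Int) : Bool :=
  if 1 < dots then false
  else if dots = 1 ∧ (frase = "." ∨ PySem.Str.pyGet? frase (-1) ≠ some '.') then false
  else true

-- B's single pass: bail out on a digit, count dots
def EfraseAltLoop (frase : String) : List Char → Int → Bool
  | [], dots => EfraseAltFinal frase dots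
  | c :: cs, dots =>
      if '0' ≤ c ∧ c ≤ '9' then false
      else EfraseAltLoop frase cs (if c = '.' then dots + 1 else dots)

def Efrase_alt (frase : String) : Bool := EfraseAltLoop frase frase.toList 0

-- ===== PRECONDITION & SPEC =====
def Spec_Efrase (frase : String) (out : Bool) : Prop := out = Efrase_alt frase
instance (frase : String) (out : Bool) : Decidable (Spec_Efrase frase out) := by unfold Spec_Efrase; infer_instance

-- ===== CLAIM (what is proved, stated in full; the proofs are below) =====
def Claim_equal_Efrase : Prop := ∀ (frase : String), Dom_Efrase frase → Spec_Efrase frase (Efrase frase)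

-- ===== LEMMAS AND PROOFS =====

-- s.count(c) for a single character is the plain character count
lemma count_go_single (c : Char) : ∀ (fuel : Nat) (cs : List Char) (acc : Nat),
    cs.length ≤ fuel → PySem.Chars.count.go [c] fuel cs acc = acc + cs.count c := by
  intro fuel
  induction fuel with
  | zero => intro cs acc h; cases cs with
    | nil => simp [PySem.Chars.count.go]
    | cons a t => simp at h
  | succ n ih =>
    intro cs acc h
    cases cs with
    | nil => simp [PySem.Chars.count.go]
    | cons a t =>
      have ht : t.length ≤ n := by simpa using h
      simp only [PySem.Chars.count.go]
      by_cases hca : c = a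
      · subst hca
        have hpre : [c].isPrefixOf (c :: t) = true := by simp [List.isPrefixOf]
        rw [hpre, if_pos rfl]
        rw [show List.drop [c].length (c :: t) = t from rfl, ih t (acc+1) ht]
        simp
        omega
      · have hpre : [c].isPrefixOf (a :: t) = false := by simp [List.isPrefixOf, hca]
        rw [hpre]
        simp only [Bool.false_eq_true, if_false, ih t acc ht]
        simp [show a ≠ c from fun h' => hca h'.symm]

lemma count_single (cs : List Char) (c : Char) :
    PySem.Chars.count cs [c] = cs.count c := by
  rw [PySem.Chars.count]
  simp only [List.isEmpty_cons, Bool.false_eq_true, if_false]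
  simpa using count_go_single c cs.length cs 0 le_rfl

-- the digit test of B agrees with membership in A's digit tuple
lemma digit_iff (c : Char) : ('0' ≤ c ∧ c ≤ '9') ↔ c ∈ ['0','1','2','3','4','5','6','7','8','9'] := by
  constructor
  · rintro ⟨h1, h2⟩
    have e1 : 48 ≤ c.toNat := h1
    have e2 : c.toNat ≤ 57 := h2
    interval_cases h : c.toNat <;> (rw [← Char.ofNat_toNat c, h]; decide)
  · intro h; fin_cases h <;> exact ⟨by decide, by decide⟩

-- A's range-over-digits loop fires exactly when the string has a digit character
lemma rangeAny_eq (frase : String) :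
    ((PySem.List.pyRange 0 10 1).any
      (fun j => PySem.Str.isIn (PySem.List.pyGetD
        EfraseNums j "") frase))
    = frase.toList.any (fun c => decide ('0' ≤ c ∧ c ≤ '9')) := by
  have hr : PySem.List.pyRange 0 10 1 = [0,1,2,3,4,5,6,7,8,9] := by decide
  rw [hr]
  simp only [List.any_cons, List.any_nil, Bool.or_false]
  by_cases h : ∃ c ∈ frase.toList, '0' ≤ c ∧ c ≤ '9'
  · obtain ⟨c, hc, hd⟩ := h
    have hmem := (digit_iff c).mp hd
    have hin : ∀ d : Char, d ∈ frase.toList →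
        PySem.Chars.isIn [d] frase.toList = true := by
      intro d hd'
      exact (PySem.Chars.isIn_iff_infix _ _).mpr ((List.singleton_infix_iff d _).mpr hd')
    have hr2 : (frase.toList.any (fun c => decide ('0' ≤ c ∧ c ≤ '9'))) = true := by
      simp only [List.any_eq_true]; exact ⟨c, hc, by simpa using hd⟩
    rw [hr2]
    fin_cases hmem <;>
      simp [PySem.List.pyGetD, PySem.List.pyGet?, PySem.List.pyIdx?, EfraseNums, hin _ hc]
  · have hnone : ∀ d : Char, d ∈ ['0','1','2','3','4','5','6','7','8','9'] →
        PySem.Chars.isIn [d] frase.toList = false := by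
      intro d hd
      apply (PySem.Chars.isIn_eq_false_iff _ _).mpr
      intro hinf
      exact h ⟨d, (List.singleton_infix_iff d _).mp hinf, (digit_iff d).mpr hd⟩
    have hr2 : (frase.toList.any (fun c => decide ('0' ≤ c ∧ c ≤ '9'))) = false := by
      simp only [List.any_eq_false]
      intro c hc hd
      exact h ⟨c, hc, by simpa using hd⟩
    rw [hr2]
    simp [PySem.List.pyGetD, PySem.List.pyGet?, PySem.List.pyIdx?, EfraseNums,
      hnone '0' (by decide), hnone '1' (by decide), hnone '2' (by decide), hnone '3' (by decide),
      hnone '4' (by decide), hnone '5' (by decide), hnone '6' (by decide), hnone '7' (by decide),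
      hnone '8' (by decide), hnone '9' (by decide)]

-- B's loop: digit scan plus dot counting, unrolled
lemma altLoop_eq (frase : String) : ∀ (cs : List Char) (dots : Int),
    EfraseAltLoop frase cs dots =
      if cs.any (fun c => decide ('0' ≤ c ∧ c ≤ '9')) then false
      else EfraseAltFinal frase (dots + cs.count '.') := by
  intro cs
  induction cs with
  | nil => intro dots; simp [EfraseAltLoop]
  | cons c t ih =>
    intro dots
    simp only [EfraseAltLoop, List.any_cons, List.count_cons]
    by_cases hd : '0' ≤ c ∧ c ≤ '9'
    · simp [hd]
    · by_cases hc : c = '.'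
      · simp [hc, ih, add_comm, add_left_comm]
      · simp [hd, hc, ih]

-- the two last-character tests coincide on a nonempty string
lemma last_eq (frase : String) (h : frase.toList ≠ []) :
    PySem.Str.pyGet? frase (PySem.Str.len frase - 1) = PySem.Str.pyGet? frase (-1) := by
  have hlen : 0 < frase.toList.length := List.length_pos_iff.mpr h
  have h1 : PySem.Str.len frase - 1 = ((frase.toList.length - 1 : Nat) : Int) := by
    rw [PySem.Str.len_eq]; omega
  rw [h1, PySem.Str.pyGet?_natCast]
  have h2 : PySem.Str.pyGet? frase (-1) = frase.toList[frase.toList.length - 1]? := by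
    simp only [PySem.Str.pyGet?_eq, PySem.Chars.pyGet?_eq_listPyGet?]
    exact PySem.List.pyGet?_neg_ofNat frase.toList 1 (by omega) (by omega)
  rw [h2]

-- a string equal to "." has dot count 1
lemma dot_count_dot : ("." : String).toList.count '.' = 1 := by decide

-- ===== VERDICT (by name: the statement is the Claim_ definition above) =====
theorem Efrase_spec : Claim_equal_Efrase := by
  intro frase _
  unfold Spec_Efrase Efrase Efrase_alt
  rw [altLoop_eq]
  rw [rangeAny_eq]
  by_cases hdig : frase.toList.any (fun c => decide ('0' ≤ c ∧ c ≤ '9')) = true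
  · simp only [hdig, if_true]
    split_ifs <;> rfl
  · rw [Bool.not_eq_true] at hdig
    simp only [hdig, Bool.false_eq_true, if_false]
    have hcnt : PySem.Str.count frase "." = frase.toList.count '.' := by
      rw [PySem.Str.count_eq]
      simpa using count_single frase.toList '.'
    rw [hcnt]
    set k := frase.toList.count '.' with hk
    by_cases hE : frase = "."
    · have hk1 : k = 1 := by rw [hk, hE]; exact dot_count_dot
      simp [hE, EfraseAltFinal, hk1]
    · by_cases hnil : frase.toList = []
      · have hk0 : k = 0 := by rw [hk, hnil]; rfl
        simp [hk0, hE, EfraseAltFinal]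
      · rw [last_eq frase hnil]
        unfold EfraseAltFinal
        set L := (PySem.Str.pyGet? frase (-1) ≠ some '.') with hL
        by_cases h1 : 1 < k
        · simp [h1, hE, show k ≠ 1 by omega, show (1:Int) < (k:Int) by exact_mod_cast h1]
        · simp only [zero_add, hE, or_false]
          by_cases hkeq : k = 1
          · by_cases hLh : L
            · simp [hkeq, show ((1:Nat):Int) = 1 from rfl]
            · simp [hkeq]
          · have : ((k:Int)) ≠ 1 := by exact_mod_cast hkeq
            simp [hkeq, this, h1]
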